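-- pv_equiv track=rewrite | github.com/JcLimonero/VGD_AGENTE_IA | agente_dwh/dwh.py | _quote_postgresql_mixed_case_identifiers
-- ===== SOURCE A (Python) =====
-- _PG_MIXED_CASE_IDENTIFIERS: tuple[str, ...] = (
--     "idAgency",
--     "ndClientDMS",
--     "IsMatriz",
--     "tokenAppoinments",
--     "customerName",
--     "statusDescription",
--     "typeDescription",
--     "sendedSalesForce",
--     "idSalesForce",
--     "resultSF",
--     "sf_jsonRequest",
--     "IdStatus",
--     "idServiceType",
--     "serviceType",
--     "serviceTypeDescription",
--     "serviceTypeDetail",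
--     "startDateTime",
--     "endDateTime",
--     "ndConsultant",
--     "consultantName",
--     "consultantMail",
--     "seller_Name",
--     "seller_Email",
--     "Est_Civil",
-- )
--
-- def _quote_postgresql_mixed_case_identifiers(sql: str) -> str:
--     """
--     PostgreSQL pliega identificadores sin comillas a minúsculas.
--     Si el LLM emite `idAgency` sin comillas, termina buscando `idagency`.
--     Este normalizador lo corrige a `"idAgency"` fuera de literales/comillas.
--     """
--     idset = set(_PG_MIXED_CASE_IDENTIFIERS)
--     out: list[str] = []
--     i = 0
--     n = len(sql)
--     state = "normal"  # normal | sq | dq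
--
--     while i < n:
--         c = sql[i]
--         if state == "normal":
--             if c == "'":
--                 state = "sq"
--                 out.append(c)
--                 i += 1
--                 continue
--             if c == '"':
--                 state = "dq"
--                 out.append(c)
--                 i += 1
--                 continue
--             if c.isalpha() or c == "_":
--                 j = i + 1
--                 while j < n and (sql[j].isalnum() or sql[j] == "_"):
--                     j += 1
--                 token = sql[i:j]
--                 if token in idset:
--                     out.append(f'"{token}"')
--                 else:
--                     out.append(token)
--                 i = j
--                 continue
--             out.append(c)
--             i += 1
--             continue
--         if state == "sq":
--             out.append(c)
--             if c == "'" and i + 1 < n and sql[i + 1] == "'":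
--                 out.append(sql[i + 1])
--                 i += 2
--                 continue
--             if c == "'":
--                 state = "normal"
--             i += 1
--             continue
--         if state == "dq":
--             out.append(c)
--             if c == '"' and i + 1 < n and sql[i + 1] == '"':
--                 out.append(sql[i + 1])
--                 i += 2
--                 continue
--             if c == '"':
--                 state = "normal"
--             i += 1
--             continue
--
--     return "".join(out)
-- ===== SOURCE B (Python) =====
-- import re
--
-- _PG_MIXED_CASE_IDENTIFIERS: tuple[str, ...] = (
--     "idAgency", "ndClientDMS", "IsMatriz", "tokenAppoinments", "customerName",
--     "statusDescription", "typeDescription", "sendedSalesForce", "idSalesForce",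
--     "resultSF", "sf_jsonRequest", "IdStatus", "idServiceType", "serviceType",
--     "serviceTypeDescription", "serviceTypeDetail", "startDateTime", "endDateTime",
--     "ndConsultant", "consultantName", "consultantMail", "seller_Name",
--     "seller_Email", "Est_Civil",
-- )
--
-- _PG_IDSET = frozenset(_PG_MIXED_CASE_IDENTIFIERS)
--
-- _TOKEN_RE = re.compile(
--     r"'(?:[^']|'')*'"        # complete single-quoted literal
--     r'|"(?:[^"]|"")*"'       # complete double-quoted literal
--     r"|'(?:[^']|'')*$"       # unterminated single-quoted tail
--     r'|"(?:[^"]|"")*$'       # unterminated double-quoted tail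
--     r"|[A-Za-z_][A-Za-z0-9_]*"  # bare identifier
-- )
--
-- def _repl(m: "re.Match[str]") -> str:
--     tok = m.group(0)
--     return f'"{tok}"' if tok in _PG_IDSET else tok
--
-- def _quote_postgresql_mixed_case_identifiers(sql: str) -> str:
--     return _TOKEN_RE.sub(_repl, sql)
-- ===== Notes on version B (the rewrite author's own statement) =====
-- stated objective: idiomatic
-- what changed: Replaces the hand-written index/state-machine while-loop by a single re.sub over the whole string with a tokenizer alternation (complete quoted literal | unterminated quoted tail | identifier) and a replacement function that quotes listed identifiers.
import Mathlib
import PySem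

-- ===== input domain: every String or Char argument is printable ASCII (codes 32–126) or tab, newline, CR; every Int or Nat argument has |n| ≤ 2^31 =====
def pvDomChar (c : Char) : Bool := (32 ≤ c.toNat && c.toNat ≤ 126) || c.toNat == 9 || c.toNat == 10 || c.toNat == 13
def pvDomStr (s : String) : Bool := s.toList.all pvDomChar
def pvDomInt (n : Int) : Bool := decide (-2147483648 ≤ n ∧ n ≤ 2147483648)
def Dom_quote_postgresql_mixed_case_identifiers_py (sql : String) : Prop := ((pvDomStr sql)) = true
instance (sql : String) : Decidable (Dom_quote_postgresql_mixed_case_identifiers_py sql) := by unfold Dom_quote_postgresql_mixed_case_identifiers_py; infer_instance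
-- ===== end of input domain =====

-- B replaces A's manual index/state while-loop by a single regex-substitution pass
-- (one tokenizer alternation: complete literal | unterminated tail | identifier); objective: idiomatic.

-- _PG_MIXED_CASE_IDENTIFIERS (module constant, shared context of both programs)
def pvPgMixedCaseIdentifiers : List String :=
  ["idAgency", "ndClientDMS", "IsMatriz", "tokenAppoinments", "customerName",
   "statusDescription", "typeDescription", "sendedSalesForce", "idSalesForce",
   "resultSF", "sf_jsonRequest", "IdStatus", "idServiceType", "serviceType",
   "serviceTypeDescription", "serviceTypeDetail", "startDateTime", "endDateTime",
   "ndConsultant", "consultantName", "consultantMail", "seller_Name",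
   "seller_Email", "Est_Civil"]

-- ===== PORT A =====
-- idset = set(_PG_MIXED_CASE_IDENTIFIERS)
def pvIdSetA : PySem.Set String := PySem.Set.ofList pvPgMixedCaseIdentifiers

-- inner loop 'while j < n and (sql[j].isalnum() or sql[j] == "_"): j += 1', returning
-- (sql[i+1:j], sql[j:]).  Char.isAlphanum/isAlpha agree with Python's isalnum/isalpha on the
-- printable-ASCII domain.
def pvScanIdentA : List Char → List Char × List Char
  | [] => ([], [])
  | c :: rest =>
    if c.isAlphanum || c == '_' then
      ((c :: (pvScanIdentA rest).1), (pvScanIdentA rest).2)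
    else ([], c :: rest)

-- needed by pvLoopA's termination (the loop resumes at i = j ≥ i + 1)
lemma pvScanIdentA_len (cs : List Char) : (pvScanIdentA cs).2.length ≤ cs.length := by
  induction cs with
  | nil => simp [pvScanIdentA]
  | cons c rest ih =>
    simp only [pvScanIdentA]
    split
    · simpa using Nat.le_succ_of_le ih
    · simp

-- the main 'while i < n' loop of A, recursing on the remaining characters;
-- state ∈ {"normal", "sq", "dq"} exactly as in the Python
def pvLoopA : List Char → String → List Char
  | [], _ => []
  | c :: rest, state =>
    if state = "normal" then
      if c = '\'' then c :: pvLoopA rest "sq"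
      else if c = '"' then c :: pvLoopA rest "dq"
      else if c.isAlpha || c == '_' then
        -- token = sql[i:j]
        let token := c :: (pvScanIdentA rest).1
        (if String.mk token ∈ pvIdSetA then '"' :: (token ++ ['"']) else token)
          ++ pvLoopA (pvScanIdentA rest).2 "normal"
      else c :: pvLoopA rest "normal"
    else if state = "sq" then
      -- out.append(c); the doubled-'' lookahead requires i + 1 < n
      match rest with
      | c2 :: rest2 =>
        if c = '\'' then
          if c2 = '\'' then c :: c2 :: pvLoopA rest2 "sq"
          else c :: pvLoopA (c2 :: rest2) "normal"
        else c :: pvLoopA (c2 :: rest2) "sq"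
      | [] => if c = '\'' then c :: pvLoopA [] "normal" else c :: pvLoopA [] "sq"
    else if state = "dq" then
      match rest with
      | c2 :: rest2 =>
        if c = '"' then
          if c2 = '"' then c :: c2 :: pvLoopA rest2 "dq"
          else c :: pvLoopA (c2 :: rest2) "normal"
        else c :: pvLoopA (c2 :: rest2) "dq"
      | [] => if c = '"' then c :: pvLoopA [] "normal" else c :: pvLoopA [] "dq"
    else []  -- unreachable: state is always one of the three strings above
termination_by cs _ => cs.length
decreasing_by
  all_goals simp
  all_goals first
    | omega
    | exact pvScanIdentA_len _

def quote_postgresql_mixed_case_identifiers_py (sql : String) : String :=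
  String.mk (pvLoopA sql.toList "normal")

-- ===== PORT B =====
-- B (Source B) is a single re.sub over the whole string with the tokenizer pattern
--   '(?:[^']|'')*'  |  "(?:[^"]|"")*"  |  '(?:[^']|'')*$  |  "(?:[^"]|"")*$  |  [A-Za-z_][A-Za-z0-9_]*
-- ported by hand (no regex engine in Lean): pvLitEnd reproduces the engine's greedy
-- backtracking match of (?:[^q]|qq)*q after an opening quote (a doubled quote is tried as
-- content before a quote is taken as the closing one), returning none exactly when no
-- closing quote exists — then the unterminated-tail alternative matches the rest of the
-- string; pvTokB is re.sub's left-to-right scan with the replacement function _repl.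
def pvIdSetB : PySem.Set String := PySem.Set.ofList pvPgMixedCaseIdentifiers

def pvLitEnd (q : Char) : List Char → Option (List Char × List Char)
  | [] => none
  | c :: rest =>
    if c = q then
      match rest with
      | c2 :: rest2 =>
        if c2 = q then
          match pvLitEnd q rest2 with
          | some (p, r) => some (c :: c2 :: p, r)   -- greedy: consume the doubled quote
          | none => some ([c], rest)                -- backtrack: close here
        else some ([c], rest)
      | [] => some ([c], [])
    else
      match pvLitEnd q rest with
      | some (p, r) => some (c :: p, r)
      | none => none

-- needed by pvTokB's termination (the match consumes at least the closing quote)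
lemma pvLitEnd_len (q : Char) : ∀ (n : Nat) (cs : List Char) (p r : List Char), cs.length ≤ n →
    pvLitEnd q cs = some (p, r) → p.length + r.length = cs.length := by
  intro n
  induction n with
  | zero =>
    intro cs p r hle h
    match cs with
    | [] => simp [pvLitEnd] at h
    | c :: _ => simp at hle
  | succ n ih =>
    intro cs p r hle h
    match cs with
    | [] => simp [pvLitEnd] at h
    | c :: rest =>
      rw [pvLitEnd.eq_def] at h; simp only at h
      by_cases hc : c = q
      · rw [if_pos hc] at h
        match rest with
        | c2 :: rest2 =>
          simp only at h
          by_cases hc2 : c2 = q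
          · rw [if_pos hc2] at h
            rcases hgo : pvLitEnd q rest2 with _ | ⟨p', r'⟩ <;> rw [hgo] at h <;>
              simp at h <;> obtain ⟨hp, hr⟩ := h <;> subst hp <;> subst hr
            · simp; omega
            · have := ih rest2 p' r' (by simp at hle; omega) hgo
              simp; omega
          · rw [if_neg hc2] at h
            simp at h; obtain ⟨hp, hr⟩ := h; subst hp; subst hr; simp; omega
        | [] =>
          simp at h; obtain ⟨hp, hr⟩ := h; subst hp; subst hr; simp
      · rw [if_neg hc] at h
        rcases hgo : pvLitEnd q rest with _ | ⟨p', r'⟩ <;> rw [hgo] at h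
        · simp at h
        · simp at h; obtain ⟨hp, hr⟩ := h; subst hp; subst hr
          have := ih rest p' r' (by simp at hle; omega) hgo
          simp; omega

-- [A-Za-z_] and [A-Za-z0-9_] from the regex
def pvIdentStartB (c : Char) : Bool := c.isUpper || c.isLower || c == '_'
def pvWordCharB (c : Char) : Bool := c.isUpper || c.isLower || c.isDigit || c == '_'

def pvTokB : List Char → List Char
  | [] => []
  | c :: rest =>
    if c = '\'' ∨ c = '"' then
      match h : pvLitEnd c rest with
      | some (p, r) => c :: (p ++ pvTokB r)  -- complete literal, left verbatim
      | none => c :: rest                    -- unterminated tail, left verbatim, scan ends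
    else if pvIdentStartB c then
      let token := c :: rest.takeWhile pvWordCharB
      (if String.mk token ∈ pvIdSetB then '"' :: (token ++ ['"']) else token)
        ++ pvTokB (rest.dropWhile pvWordCharB)
    else c :: pvTokB rest
termination_by cs => cs.length
decreasing_by
  · have := pvLitEnd_len c rest.length rest _ _ le_rfl h; simp; omega
  · have := List.length_dropWhile_le pvWordCharB rest; simp; omega
  · simp

def quote_postgresql_mixed_case_identifiers_py_alt (sql : String) : String :=
  String.mk (pvTokB sql.toList)

-- ===== PRECONDITION & SPEC =====
def Spec_quote_postgresql_mixed_case_identifiers_py (sql : String) (out : String) : Prop := out = quote_postgresql_mixed_case_identifiers_py_alt sql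
instance (sql : String) (out : String) : Decidable (Spec_quote_postgresql_mixed_case_identifiers_py sql out) := by unfold Spec_quote_postgresql_mixed_case_identifiers_py; infer_instance

-- ===== CLAIM (what is proved, stated in full; the proofs are below) =====
def Claim_equal_quote_postgresql_mixed_case_identifiers_py : Prop := ∀ (sql : String), Dom_quote_postgresql_mixed_case_identifiers_py sql → Spec_quote_postgresql_mixed_case_identifiers_py sql (quote_postgresql_mixed_case_identifiers_py sql)

-- ===== LEMMAS AND PROOFS =====

-- A's inner identifier scan is the regex's takeWhile/dropWhile split
lemma pvWordCharB_eq (c : Char) : (c.isAlphanum || c == '_') = pvWordCharB c := by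
  simp [pvWordCharB, Char.isAlphanum, Char.isAlpha, Bool.or_assoc]

lemma pvIdentStartB_eq (c : Char) : (c.isAlpha || c == '_') = pvIdentStartB c := by
  simp [pvIdentStartB, Char.isAlpha, Bool.or_assoc]

lemma pvScanIdentA_spec (cs : List Char) :
    pvScanIdentA cs = (cs.takeWhile pvWordCharB, cs.dropWhile pvWordCharB) := by
  induction cs with
  | nil => rfl
  | cons c rest ih =>
    simp only [pvScanIdentA, List.takeWhile, List.dropWhile, pvWordCharB_eq c]
    cases hw : pvWordCharB c <;> simp [ih]

-- pvLitEnd fails only when no quote is left at all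
lemma pvLitEnd_none (q : Char) : ∀ (n : Nat) (cs : List Char), cs.length ≤ n →
    pvLitEnd q cs = none → q ∉ cs := by
  intro n
  induction n with
  | zero =>
    intro cs hle h
    match cs with
    | [] => simp
    | c :: _ => simp at hle
  | succ n ih =>
    intro cs hle h
    match cs with
    | [] => simp
    | c :: rest =>
      rw [pvLitEnd.eq_def] at h; simp only at h
      by_cases hc : c = q
      · rw [if_pos hc] at h
        match rest with
        | c2 :: rest2 =>
          simp only at h
          by_cases hc2 : c2 = q
          · rw [if_pos hc2] at h
            rcases hgo : pvLitEnd q rest2 with _ | _ <;> rw [hgo] at h <;> simp at h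
          · rw [if_neg hc2] at h; simp at h
        | [] => simp at h
      · rw [if_neg hc] at h
        rcases hgo : pvLitEnd q rest with _ | _ <;> rw [hgo] at h
        · have := ih rest (by simp at hle; omega) hgo
          simp
          exact ⟨fun he => hc he.symm, this⟩
        · simp at h

-- with no closing quote left, A's literal state copies the rest verbatim
lemma pvLoopA_stuck_sq : ∀ cs : List Char, '\'' ∉ cs → pvLoopA cs "sq" = cs := by
  intro cs
  induction cs with
  | nil => intro _; rw [pvLoopA]
  | cons c rest ih =>
    intro h
    simp at h
    cases rest with
    | nil =>
      rw [pvLoopA.eq_def]; simp only [String.reduceEq, reduceIte]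
      rw [if_neg (fun he => h.1 he.symm), pvLoopA]
    | cons c2 rest2 =>
      rw [pvLoopA.eq_def]; simp only [String.reduceEq, reduceIte]
      rw [if_neg (fun he => h.1 he.symm)]
      rw [ih h.2]

lemma pvLoopA_stuck_dq : ∀ cs : List Char, '"' ∉ cs → pvLoopA cs "dq" = cs := by
  intro cs
  induction cs with
  | nil => intro _; rw [pvLoopA]
  | cons c rest ih =>
    intro h
    simp at h
    cases rest with
    | nil =>
      rw [pvLoopA.eq_def]; simp only [String.reduceEq, reduceIte]
      rw [if_neg (fun he => h.1 he.symm), pvLoopA]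
    | cons c2 rest2 =>
      rw [pvLoopA.eq_def]; simp only [String.reduceEq, reduceIte]
      rw [if_neg (fun he => h.1 he.symm)]
      rw [ih h.2]

-- one-step unfoldings of B's scan
lemma pvTokB_quote (c : Char) (rest : List Char) (hq : c = '\'' ∨ c = '"') :
    pvTokB (c :: rest) = (match pvLitEnd c rest with
      | some (p, r) => c :: (p ++ pvTokB r) | none => c :: rest) := by
  rw [pvTokB.eq_def]
  simp only [if_pos hq]
  rcases hgo : pvLitEnd c rest with _ | ⟨p, r⟩ <;> simp only [hgo]

lemma pvTokB_ident (c : Char) (rest : List Char) (h1 : ¬(c = '\'' ∨ c = '"'))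
    (h2 : pvIdentStartB c = true) :
    pvTokB (c :: rest) =
      (if String.mk (c :: rest.takeWhile pvWordCharB) ∈ pvIdSetB then
        '"' :: ((c :: rest.takeWhile pvWordCharB) ++ ['"'])
       else (c :: rest.takeWhile pvWordCharB)) ++ pvTokB (rest.dropWhile pvWordCharB) := by
  rw [pvTokB.eq_def]
  simp only [if_neg h1, if_pos h2]

lemma pvTokB_other (c : Char) (rest : List Char) (h1 : ¬(c = '\'' ∨ c = '"'))
    (h2 : ¬ pvIdentStartB c = true) :
    pvTokB (c :: rest) = c :: pvTokB rest := by
  rw [pvTokB.eq_def]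
  simp only [if_neg h1, if_neg h2]

lemma pvLitEnd_cons_ne (q c : Char) (cs : List Char) (h : ¬ c = q) :
    pvLitEnd q (c :: cs) = (match pvLitEnd q cs with
      | some (p, r) => some (c :: p, r) | none => none) := by
  rw [pvLitEnd.eq_def]; simp only [if_neg h]

-- main equivalence, by strong induction on the length: A's "normal" state matches B's
-- top-level scan, and A's "sq"/"dq" states match B's greedy literal match
lemma pvMain : ∀ (n : Nat) (cs : List Char), cs.length ≤ n →
    (pvLoopA cs "normal" = pvTokB cs) ∧
    (pvLoopA cs "sq" = (match pvLitEnd '\'' cs with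
       | some (p, r) => p ++ pvTokB r
       | none => cs)) ∧
    (pvLoopA cs "dq" = (match pvLitEnd '"' cs with
       | some (p, r) => p ++ pvTokB r
       | none => cs)) := by
  intro n
  induction n with
  | zero =>
    intro cs hle
    match cs with
    | [] => exact ⟨by simp [pvLoopA, pvTokB], by simp [pvLoopA, pvLitEnd], by simp [pvLoopA, pvLitEnd]⟩
  | succ n ih =>
    intro cs hle
    match cs with
    | [] => exact ⟨by simp [pvLoopA, pvTokB], by simp [pvLoopA, pvLitEnd], by simp [pvLoopA, pvLitEnd]⟩
    | c :: rest =>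
      have hrest : rest.length ≤ n := by simp at hle; omega
      have ihP := fun xs (h : List.length xs ≤ n) => (ih xs h).1
      have ihQ := fun xs (h : List.length xs ≤ n) => (ih xs h).2.1
      have ihR := fun xs (h : List.length xs ≤ n) => (ih xs h).2.2
      refine ⟨?_, ?_, ?_⟩
      · -- state "normal"
        rw [pvLoopA.eq_def]; simp only [String.reduceEq, reduceIte]
        by_cases h1 : c = '\''
        · rw [if_pos h1, pvTokB_quote c rest (Or.inl h1), ihQ rest hrest]
          subst h1
          rcases hgo : pvLitEnd '\'' rest with _ | ⟨p, r⟩ <;> simp only [hgo]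
        · rw [if_neg h1]
          by_cases h2 : c = '"'
          · rw [if_pos h2, pvTokB_quote c rest (Or.inr h2), ihR rest hrest]
            subst h2
            rcases hgo : pvLitEnd '"' rest with _ | ⟨p, r⟩ <;> simp only [hgo]
          · rw [if_neg h2]
            by_cases h3 : (c.isAlpha || c == '_') = true
            · rw [if_pos h3]
              rw [pvTokB_ident c rest (by push_neg; exact ⟨h1, h2⟩)
                    (by rw [← pvIdentStartB_eq]; exact h3)]
              rw [pvScanIdentA_spec]
              rw [ihP (rest.dropWhile pvWordCharB)
                    (le_trans (List.length_dropWhile_le _ _) hrest)]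
              rfl
            · rw [if_neg h3]
              rw [pvTokB_other c rest (by push_neg; exact ⟨h1, h2⟩)
                    (by rw [← pvIdentStartB_eq]; exact h3)]
              rw [ihP rest hrest]
      · -- state "sq"
        cases rest with
        | nil =>
          rw [pvLoopA.eq_def]; simp only [String.reduceEq, reduceIte]
          by_cases h1 : c = '\''
          · subst h1; rw [if_pos rfl, pvLoopA]
            simp [pvLitEnd, pvTokB]
          · rw [if_neg h1, pvLoopA]
            simp [pvLitEnd, h1]
        | cons c2 rest2 =>
          have hrest2 : rest2.length ≤ n := by simp at hle; omega
          rw [pvLoopA.eq_def]; simp only [String.reduceEq, reduceIte]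
          by_cases h1 : c = '\''
          · subst h1
            rw [if_pos rfl]
            by_cases h2 : c2 = '\''
            · subst h2
              rw [if_pos rfl, pvLitEnd.eq_def]
              simp only [Char.reduceEq, reduceIte]
              rcases hgo : pvLitEnd '\'' rest2 with _ | ⟨p, r⟩
              · simp only [hgo]
                rw [pvTokB_quote _ _ (Or.inl rfl), hgo]
                rw [pvLoopA_stuck_sq rest2 (pvLitEnd_none '\'' rest2.length rest2 le_rfl hgo)]
                simp
              · simp only [hgo]
                rw [ihQ rest2 hrest2, hgo]
                simp
            · rw [if_neg h2, pvLitEnd.eq_def]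
              simp only [Char.reduceEq, reduceIte, if_neg h2]
              rw [ihP (c2 :: rest2) hrest]
              simp
          · rw [if_neg h1]
            rw [ihQ (c2 :: rest2) hrest, pvLitEnd_cons_ne '\'' c (c2 :: rest2) h1]
            rcases hgo : pvLitEnd '\'' (c2 :: rest2) with _ | ⟨p, r⟩ <;> simp
      · -- state "dq"
        cases rest with
        | nil =>
          rw [pvLoopA.eq_def]; simp only [String.reduceEq, reduceIte]
          by_cases h1 : c = '"'
          · subst h1; rw [if_pos rfl, pvLoopA]
            simp [pvLitEnd, pvTokB]
          · rw [if_neg h1, pvLoopA]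
            simp [pvLitEnd, h1]
        | cons c2 rest2 =>
          have hrest2 : rest2.length ≤ n := by simp at hle; omega
          rw [pvLoopA.eq_def]; simp only [String.reduceEq, reduceIte]
          by_cases h1 : c = '"'
          · subst h1
            rw [if_pos rfl]
            by_cases h2 : c2 = '"'
            · subst h2
              rw [if_pos rfl, pvLitEnd.eq_def]
              simp only [Char.reduceEq, reduceIte]
              rcases hgo : pvLitEnd '"' rest2 with _ | ⟨p, r⟩
              · simp only [hgo]
                rw [pvTokB_quote _ _ (Or.inr rfl), hgo]
                rw [pvLoopA_stuck_dq rest2 (pvLitEnd_none '"' rest2.length rest2 le_rfl hgo)]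
                simp
              · simp only [hgo]
                rw [ihR rest2 hrest2, hgo]
                simp
            · rw [if_neg h2, pvLitEnd.eq_def]
              simp only [Char.reduceEq, reduceIte, if_neg h2]
              rw [ihP (c2 :: rest2) hrest]
              simp
          · rw [if_neg h1]
            rw [ihR (c2 :: rest2) hrest, pvLitEnd_cons_ne '"' c (c2 :: rest2) h1]
            rcases hgo : pvLitEnd '"' (c2 :: rest2) with _ | ⟨p, r⟩ <;> simp

-- ===== VERDICT (by name: the statement is the Claim_ definition above) =====
theorem quote_postgresql_mixed_case_identifiers_py_spec : Claim_equal_quote_postgresql_mixed_case_identifiers_py := by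
  intro sql _
  unfold Spec_quote_postgresql_mixed_case_identifiers_py
  unfold quote_postgresql_mixed_case_identifiers_py quote_postgresql_mixed_case_identifiers_py_alt
  rw [(pvMain sql.toList.length sql.toList le_rfl).1]
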